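-- pv_equiv track=rewrite | github.com/zingloir/AoC_2020 | day6/day6.py | parttwo
-- ===== SOURCE A (Python) =====
-- def parttwo(line_input):
--     every_yes = []
--     for c in line_input[0]:
--         exists = 1
--         j = 1
--         while j < len(line_input):
--             if c in line_input[j]:
--                 exists += 1
--             j += 1
--         if exists == len(line_input) and c not in every_yes:
--             every_yes.append(c)
--     return len(every_yes)
-- ===== SOURCE B (Python) =====
-- def parttwo(line_input):
--     common = set(line_input[0])
--     for line in line_input[1:]:
--         if not common:
--             break
--         common = common.intersection(line)
--     return len(common)
-- ===== Notes on version B (the rewrite author's own statement) =====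
-- stated objective: faster
-- what changed: Replaces the per-character scan of every other line (with a linear duplicate check against the accumulator list) by a single pass intersecting the running character set with each line, breaking early once the intersection is empty.
import Mathlib
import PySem

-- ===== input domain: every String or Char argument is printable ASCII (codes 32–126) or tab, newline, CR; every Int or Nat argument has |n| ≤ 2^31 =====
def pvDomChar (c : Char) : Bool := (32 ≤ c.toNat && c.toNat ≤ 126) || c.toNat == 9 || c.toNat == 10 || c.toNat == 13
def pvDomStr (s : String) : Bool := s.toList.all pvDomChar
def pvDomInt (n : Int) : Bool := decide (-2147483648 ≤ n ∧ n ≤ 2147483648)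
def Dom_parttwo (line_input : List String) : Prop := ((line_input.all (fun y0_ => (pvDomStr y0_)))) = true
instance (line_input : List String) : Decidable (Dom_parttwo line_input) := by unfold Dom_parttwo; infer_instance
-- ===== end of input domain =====

-- B replaces A's per-character scan of every other line by one pass intersecting the lines' character sets (faster).


-- ===== PORT A =====
-- 'c in line_input[j]' with c a single character is exactly character membership, ported as List.contains.
def parttwo (line_input : List String) : Int :=
  let s0 := PySem.List.pyGetD line_input 0 ""
  let every_yes : List Char := s0.toList.foldl (fun ey c =>
    let ex : Int := (PySem.List.pyRange 1 (line_input.length : Int) 1).foldl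
      (fun e j => if ((PySem.List.pyGetD line_input j "").toList.contains c) then e + 1 else e) 1
    if ex = (line_input.length : Int) ∧ c ∉ ey then ey ++ [c] else ey) []
  (every_yes.length : Int)

-- ===== PORT B =====
-- the loop with its early break: stop as soon as the running intersection is empty
def parttwoAltLoop (common : PySem.Set Char) (rest : List String) : PySem.Set Char :=
  match rest with
  | [] => common
  | s :: rs =>
      if common.isEmpty then common
      else parttwoAltLoop (PySem.Set.inter common s.toList) rs

def parttwo_alt (line_input : List String) : Int :=
  match line_input with
  | [] => 0   -- unreachable under Pre_ (Source B raises IndexError on [])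
  | s0 :: rest => PySem.Set.len (parttwoAltLoop (PySem.Set.ofList s0.toList) rest)

-- ===== PRECONDITION & SPEC =====
-- Pre_ excludes only the empty list, on which A raises IndexError (line_input[0]).
def Pre_parttwo (line_input : List String) : Prop := line_input ≠ []
instance (line_input : List String) : Decidable (Pre_parttwo line_input) := by unfold Pre_parttwo; infer_instance
def pvWitness_parttwo : List String := ["abc", "bcd"]
def Spec_parttwo (line_input : List String) (out : Int) : Prop := out = parttwo_alt line_input
instance (line_input : List String) (out : Int) : Decidable (Spec_parttwo line_input out) := by unfold Spec_parttwo; infer_instance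

-- ===== CLAIM (what is proved, stated in full; the proofs are below) =====
def Claim_equal_parttwo : Prop := ∀ (line_input : List String), Dom_parttwo line_input → Pre_parttwo line_input → Spec_parttwo line_input (parttwo line_input)

-- ===== LEMMAS AND PROOFS =====

-- the common predicate: c appears in every line after the first
def pvAllLines (rest : List String) (c : Char) : Bool := rest.all (fun s => s.toList.contains c)

-- B's intersection loop (break included) is a filter of the accumulator
theorem pv_interFold (rest : List String) (acc : PySem.Set Char) :
    parttwoAltLoop acc rest = acc.filter (pvAllLines rest) := by
  induction rest generalizing acc with
  | nil =>
      exact (List.filter_true acc).symm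
  | cons s rs ih =>
      rw [parttwoAltLoop]
      by_cases h : acc.isEmpty
      · rw [if_pos h, List.isEmpty_iff.mp h, List.filter_nil]
      · rw [if_neg h, ih]
        simp only [PySem.Set.inter, List.filter_filter]
        apply List.filter_congr
        intro c _
        simp [pvAllLines, Bool.and_comm]

-- A's accumulator list is the dedup of the first line filtered by pvAllLines
theorem pv_everyYes (s0 : String) (rest : List String) :
    s0.toList.foldl (fun ey c =>
      let ex : Int := (PySem.List.pyRange 1 (((s0 :: rest) : List String).length : Int) 1).foldl
        (fun e j => if ((PySem.List.pyGetD (s0 :: rest) j "").toList.contains c) then e + 1 else e) 1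
      if ex = (((s0 :: rest) : List String).length : Int) ∧ c ∉ ey then ey ++ [c] else ey) []
      = PySem.Set.ofList (s0.toList.filter (pvAllLines rest)) := by
  have hstep : ∀ (ey : List Char) (c : Char), c ∈ s0.toList →
      (let ex : Int := (PySem.List.pyRange 1 (((s0 :: rest) : List String).length : Int) 1).foldl
        (fun e j => if ((PySem.List.pyGetD (s0 :: rest) j "").toList.contains c) then e + 1 else e) 1
      if ex = (((s0 :: rest) : List String).length : Int) ∧ c ∉ ey then ey ++ [c] else ey)
      = if pvAllLines rest c then PySem.Set.add ey c else ey := by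
    intro ey c _
    have hx : (PySem.List.pyRange 1 (((s0 :: rest) : List String).length : Int) 1).foldl
        (fun e j => if ((PySem.List.pyGetD (s0 :: rest) j "").toList.contains c) then e + 1 else e) 1
        = 1 + (rest.countP (fun s => s.toList.contains c) : Int) := by
      rw [PySem.List.foldl_pyRange_pyGetD' (s0 :: rest) "" (fun e s => if s.toList.contains c then e + 1 else e) 1 (by norm_num)]
      rw [show ((1 : Int).toNat) = 1 from rfl, List.drop_succ_cons, List.drop_zero]
      rw [PySem.List.foldl_if_add_one (fun s => s.toList.contains c) rest 1]
    simp only [hx]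
    by_cases hP : pvAllLines rest c = true
    · have hcnt : rest.countP (fun s => s.toList.contains c) = rest.length := by
        rw [List.countP_eq_length]
        intro s hs
        exact (List.all_eq_true.mp hP) s hs
      have hn : (1 : Int) + (rest.countP (fun s => s.toList.contains c) : Int)
          = (((s0 :: rest) : List String).length : Int) := by
        rw [hcnt, List.length_cons]; push_cast; ring
      simp only [hn, true_and, hP, if_true, PySem.Set.add_eq_ite]
      by_cases hc : c ∈ ey <;> simp [hc]
    · have hne : rest.countP (fun s => s.toList.contains c) ≠ rest.length := by
        intro h; exact hP (List.all_eq_true.mpr (List.countP_eq_length.mp h))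
      have hcond : ¬((1 : Int) + (rest.countP (fun s => s.toList.contains c) : Int)
          = (((s0 :: rest) : List String).length : Int) ∧ c ∉ ey) := by
        rintro ⟨h1, -⟩
        apply hne
        rw [List.length_cons] at h1
        omega
      rw [if_neg hcond]
      simp [hP]
  calc s0.toList.foldl _ []
      = s0.toList.foldl (fun ey c => if pvAllLines rest c then PySem.Set.add ey c else ey) [] :=
        PySem.List.foldl_congr_mem _ _ _ _ hstep
    _ = (s0.toList.filter (pvAllLines rest)).foldl PySem.Set.add [] :=
        PySem.List.foldl_if_eq_foldl_filter _ _ _ _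
    _ = PySem.Set.ofList (s0.toList.filter (pvAllLines rest)) :=
        (PySem.Set.ofList_eq_foldl _).symm

-- lengths of "dedup then filter" and "filter then dedup" agree
theorem pv_len_ofList_filter (l : List Char) (p : Char → Bool) :
    (PySem.Set.ofList (l.filter p)).length = ((PySem.Set.ofList l).filter p).length := by
  have hperm : (PySem.Set.ofList (l.filter p)).Perm ((PySem.Set.ofList l).filter p) := by
    rw [List.perm_ext_iff_of_nodup (PySem.Set.nodup_ofList _)
      ((PySem.Set.nodup_ofList l).filter p)]
    intro c
    simp [PySem.Set.mem_ofList, List.mem_filter]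
  exact hperm.length_eq

-- ===== VERDICT (by name: the statement is the Claim_ definition above) =====
theorem parttwo_spec : Claim_equal_parttwo := by
  intro line_input _ hpre
  match line_input with
  | [] => exact absurd rfl hpre
  | s0 :: rest =>
      show parttwo (s0 :: rest) = parttwo_alt (s0 :: rest)
      unfold parttwo parttwo_alt
      simp only [PySem.List.pyGetD_zero_cons]
      rw [pv_everyYes s0 rest]
      rw [show parttwoAltLoop (PySem.Set.ofList s0.toList) rest = _ from pv_interFold rest (PySem.Set.ofList s0.toList)]
      simp [PySem.Set.len, pv_len_ofList_filter]
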